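-- pv_equiv track=rewrite | github.com/smhaus/smhpy-util | src/smhpy_util/word-util.py | number_word
-- ===== SOURCE A (Python) =====
-- def number_word(num):
-- 	if num < 20:
-- 		nw = ['zero','one','two','three','four','five','six','seven','eight','nine','ten','eleven','twelve','thirteen','fourteen','fifteen','sixteen','seventeen','eighteen','nineteen']
-- 		return nw[num]
-- 	tens = num // 10
-- 	ones = num % 10
-- 	ts = ['0x','1x','twenty','thirty','forty','fifty','sixty','seventy','eighty','ninety']
-- 	s = ts[tens]
-- 	if ones > 0:
-- 		s += '-'
-- 		s += number_word(ones)
-- 	return s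
-- ===== SOURCE B (Python) =====
-- def number_word(num):
--     units = ['zero','one','two','three','four','five','six','seven','eight','nine','ten','eleven','twelve','thirteen','fourteen','fifteen','sixteen','seventeen','eighteen','nineteen']
--     if num < 20:
--         return units[num]
--     tens = ['0x','1x','twenty','thirty','forty','fifty','sixty','seventy','eighty','ninety']
--     table = [t + ('' if o == 0 else '-' + units[o]) for t in tens for o in range(10)]
--     return table[num]
-- ===== Notes on version B (the rewrite author's own statement) =====
-- stated objective: alternative
-- what changed: B precomputes the entire 0..99 word table once with a nested comprehension (no division, no recursion) and answers numbers >= 20 by a single index into that table; A computes divmod and recurses on the ones digit.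
import Mathlib
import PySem

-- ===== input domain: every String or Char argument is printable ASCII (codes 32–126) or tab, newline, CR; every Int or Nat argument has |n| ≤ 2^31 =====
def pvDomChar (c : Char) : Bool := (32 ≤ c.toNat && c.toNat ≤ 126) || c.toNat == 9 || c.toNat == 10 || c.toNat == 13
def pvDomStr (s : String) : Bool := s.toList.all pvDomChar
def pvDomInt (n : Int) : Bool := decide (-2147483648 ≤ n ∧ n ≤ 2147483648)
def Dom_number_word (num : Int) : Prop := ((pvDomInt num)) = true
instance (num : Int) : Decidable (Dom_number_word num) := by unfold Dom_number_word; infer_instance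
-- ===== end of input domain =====

-- B replaces A's division + self-recursion by building the whole 0..99 word table once
-- with a nested comprehension and doing a single index into it (objective: alternative).

-- ===== PORT A =====
def nwA : List String := ["zero","one","two","three","four","five","six","seven","eight","nine","ten","eleven","twelve","thirteen","fourteen","fifteen","sixteen","seventeen","eighteen","nineteen"]
def tsA : List String := ["0x","1x","twenty","thirty","forty","fifty","sixty","seventy","eighty","ninety"]

def number_word (num : Int) : String :=
  if num < 20 then
    (PySem.List.pyGet? nwA num).getD ""   -- none = IndexError, excluded by Pre_
  else
    let tens := PySem.Int.floordiv num 10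
    let ones := PySem.Int.mod num 10
    let s := (PySem.List.pyGet? tsA tens).getD ""   -- none = IndexError, excluded by Pre_
    if ones > 0 then s ++ "-" ++ number_word ones else s
termination_by num.natAbs
decreasing_by
  have h2 : PySem.Int.mod num 10 < 10 := by
    rw [PySem.Int.mod_eq_emod_of_pos (by omega)]; exact Int.emod_lt_of_pos _ (by omega)
  omega

-- ===== PORT B =====
def unitsB : List String := ["zero","one","two","three","four","five","six","seven","eight","nine","ten","eleven","twelve","thirteen","fourteen","fifteen","sixteen","seventeen","eighteen","nineteen"]
def tensB : List String := ["0x","1x","twenty","thirty","forty","fifty","sixty","seventy","eighty","ninety"]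

-- the nested comprehension [t + ('' if o == 0 else '-' + units[o]) for t in tens for o in range(10)]
def tableB : List String :=
  tensB.flatMap (fun t =>
    (PySem.List.pyRange 0 10 1).map (fun o =>
      t ++ (if o = 0 then "" else "-" ++ (PySem.List.pyGet? unitsB o).getD "")))

def number_word_alt (num : Int) : String :=
  if num < 20 then
    (PySem.List.pyGet? unitsB num).getD ""   -- none = IndexError, excluded by Pre_
  else
    (PySem.List.pyGet? tableB num).getD ""   -- none = IndexError, excluded by Pre_

-- ===== PRECONDITION & SPEC =====
-- A raises IndexError for num < -20 (negative index past the units list) and for num ≥ 100 (tens index out of range).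
def Pre_number_word (num : Int) : Prop := -20 ≤ num ∧ num < 100
instance (num : Int) : Decidable (Pre_number_word num) := by unfold Pre_number_word; infer_instance
def pvWitness_number_word : Int := 47

def Spec_number_word (num : Int) (out : String) : Prop := out = number_word_alt num
instance (num : Int) (out : String) : Decidable (Spec_number_word num out) := by unfold Spec_number_word; infer_instance

-- ===== CLAIM =====
def Claim_equal_number_word : Prop := ∀ (num : Int), Dom_number_word num → Pre_number_word num → Spec_number_word num (number_word num)

-- ===== LEMMAS AND PROOFS =====
theorem tables_units : nwA = unitsB := rfl

-- the flat table agrees with the tens/units decomposition on every admissible index (80 cases, by evaluation;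
-- no well-founded recursion involved, so the kernel can compute it)
theorem tbl : (List.range 80).all (fun n =>
    (PySem.List.pyGet? tableB ((n : Int) + 20)).getD "" ==
      ((PySem.List.pyGet? tsA (PySem.Int.floordiv ((n : Int) + 20) 10)).getD "" ++
        (if PySem.Int.mod ((n : Int) + 20) 10 > 0 then
          "-" ++ (PySem.List.pyGet? nwA (PySem.Int.mod ((n : Int) + 20) 10)).getD ""
        else ""))) = true := by decide

theorem tbl_get (num : Int) (h1 : 20 ≤ num) (h2 : num < 100) :
    (PySem.List.pyGet? tableB num).getD "" =
      (PySem.List.pyGet? tsA (PySem.Int.floordiv num 10)).getD "" ++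
        (if PySem.Int.mod num 10 > 0 then
          "-" ++ (PySem.List.pyGet? nwA (PySem.Int.mod num 10)).getD ""
        else "") := by
  have h := tbl
  rw [List.all_eq_true] at h
  have hn : (num - 20).toNat ∈ List.range 80 := by rw [List.mem_range]; omega
  have := h _ hn
  rw [beq_iff_eq] at this
  have heq : ((num - 20).toNat : Int) + 20 = num := by omega
  rwa [heq] at this

theorem number_word_eq_alt (num : Int) (hl : -20 ≤ num) (hh : num < 100) :
    number_word num = number_word_alt num := by
  rw [number_word, number_word_alt]
  by_cases h : num < 20
  · rw [if_pos h, if_pos h, tables_units]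
  · rw [if_neg h, if_neg h, tbl_get num (by omega) hh]
    have hm : PySem.Int.mod num 10 = num % 10 := PySem.Int.mod_eq_emod_of_pos (by norm_num)
    have h1 : 0 ≤ num % 10 := Int.emod_nonneg _ (by norm_num)
    have h2 : num % 10 < 10 := Int.emod_lt_of_pos _ (by norm_num)
    simp only [hm]
    by_cases hz : 0 < num % 10
    · rw [if_pos hz, if_pos hz, number_word, if_pos (by omega : num % 10 < 20), String.append_assoc]
    · rw [if_neg hz, if_neg hz]
      simp

-- ===== VERDICT =====
theorem number_word_spec : Claim_equal_number_word := by
  intro num _ hpre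
  exact number_word_eq_alt num hpre.1 hpre.2
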